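-- pv_equiv track=rewrite | github.com/panlab-bioinfo/GPhase | cluster_hap/louvain_reassign_allele.py | correct_collapse_num
-- ===== SOURCE A (Python) =====
-- import copy
--
-- def correct_collapse_num(utgs_list, collapse_num_dict, cluster_dict, utg_group_dict):
--
--     correct_collapse_num_dict = copy.deepcopy(collapse_num_dict)
--
--     for utg in utgs_list:
--         if utg not in utg_group_dict and collapse_num_dict[utg] == 1:
--             correct_collapse_num_dict[utg] = -1
--
--     for group in cluster_dict:
--         for ctg in cluster_dict[group]:
--             if ctg in correct_collapse_num_dict:
--                 correct_collapse_num_dict[ctg] -= 1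
--     return correct_collapse_num_dict
-- ===== SOURCE B (Python) =====
-- def correct_collapse_num(utgs_list, collapse_num_dict, cluster_dict, utg_group_dict):
--     # Each key computes its own answer independently: no copied dict, no
--     # mutation passes, no intermediate table -- a pure per-key projection.
--     def occurrences(key):
--         return sum(ctgs.count(key) for ctgs in cluster_dict.values())
--
--     def base(key, val):
--         if val == 1 and key in utgs_list and key not in utg_group_dict:
--             return -1
--         return val
--
--     return {k: base(k, v) - occurrences(k) for k, v in collapse_num_dict.items()}
-- ===== Notes on version B (the rewrite author's own statement) =====
-- stated objective: alternative
-- what changed: Replaces the deepcopy plus two in-place mutation passes driven by utgs_list and the clusters with a pure per-key projection: a single comprehension over collapse_num_dict in which each key independently computes its base value (-1 if forced) and subtracts its occurrence count obtained by scanning the cluster lists for that key.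
import Mathlib
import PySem

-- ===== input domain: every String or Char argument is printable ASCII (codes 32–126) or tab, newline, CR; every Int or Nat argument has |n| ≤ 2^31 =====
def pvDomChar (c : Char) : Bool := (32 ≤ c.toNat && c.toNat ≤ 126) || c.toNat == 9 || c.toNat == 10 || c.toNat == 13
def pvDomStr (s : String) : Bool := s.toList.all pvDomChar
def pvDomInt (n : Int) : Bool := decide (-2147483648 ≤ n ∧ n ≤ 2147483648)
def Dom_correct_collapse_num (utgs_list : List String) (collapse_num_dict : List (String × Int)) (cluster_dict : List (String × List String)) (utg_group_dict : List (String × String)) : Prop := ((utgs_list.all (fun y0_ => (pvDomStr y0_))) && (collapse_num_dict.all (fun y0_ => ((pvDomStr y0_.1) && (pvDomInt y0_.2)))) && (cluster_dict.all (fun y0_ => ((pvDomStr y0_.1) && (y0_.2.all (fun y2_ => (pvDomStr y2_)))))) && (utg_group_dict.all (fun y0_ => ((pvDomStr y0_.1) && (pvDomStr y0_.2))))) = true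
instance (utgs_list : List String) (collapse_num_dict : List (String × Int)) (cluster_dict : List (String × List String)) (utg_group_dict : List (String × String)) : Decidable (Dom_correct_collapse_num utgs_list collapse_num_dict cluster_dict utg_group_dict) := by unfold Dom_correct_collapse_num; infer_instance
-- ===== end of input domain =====

-- B replaces A's deepcopy + two in-place mutation passes by a pure per-key projection: each key of
-- collapse_num_dict independently computes its base value and subtracts its own occurrence count found by
-- scanning the cluster lists (objective: alternative; return value only).

-- ===== PORT A =====
def correct_collapse_num (utgs_list : List String) (collapse_num_dict : List (String × Int)) (cluster_dict : List (String × List String)) (utg_group_dict : List (String × String)) : List (String × Int) :=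
  let cnd : PySem.Dict String Int := PySem.Dict.mk collapse_num_dict
  let ugd : PySem.Dict String String := PySem.Dict.mk utg_group_dict
  let cld : PySem.Dict String (List String) := PySem.Dict.mk cluster_dict
  -- correct_collapse_num_dict = copy.deepcopy(collapse_num_dict); first loop: set forced keys to -1
  let d1 := utgs_list.foldl (fun d utg =>
      if ugd.contains utg = false ∧ cnd.getD utg 0 = 1 then d.insert utg (-1) else d) cnd
  -- second loop: for group in cluster_dict: for ctg in cluster_dict[group]: if ctg in d: d[ctg] -= 1
  let d2 := cld.keys.foldl (fun d group =>
      (cld.getD group []).foldl (fun d ctg =>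
        if d.contains ctg = true then d.modify ctg 0 (fun x => x - 1) else d) d) d1
  d2.items

-- ===== PORT B =====
def correct_collapse_num_alt (utgs_list : List String) (collapse_num_dict : List (String × Int)) (cluster_dict : List (String × List String)) (utg_group_dict : List (String × String)) : List (String × Int) :=
  let cnd : PySem.Dict String Int := PySem.Dict.mk collapse_num_dict
  let ugd : PySem.Dict String String := PySem.Dict.mk utg_group_dict
  let cld : PySem.Dict String (List String) := PySem.Dict.mk cluster_dict
  -- def occurrences(key): return sum(ctgs.count(key) for ctgs in cluster_dict.values())
  let occurrences : String → Int := fun key =>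
    (cld.values.map (fun ctgs => (PySem.List.count ctgs key : Int))).sum
  -- def base(key, val): if val == 1 and key in utgs_list and key not in utg_group_dict: return -1; return val
  let base : String → Int → Int := fun key val =>
    if val = 1 ∧ key ∈ utgs_list ∧ ugd.contains key = false then -1 else val
  -- {k: base(k, v) - occurrences(k) for k, v in collapse_num_dict.items()}
  (cnd.items.foldl (fun r kv => r.insert kv.1 (base kv.1 kv.2 - occurrences kv.1)) PySem.Dict.empty).items

-- ===== PRECONDITION & SPEC =====
-- Pre_ admits exactly the dict-shaped inputs on which Python A returns: the association lists standing for the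
-- dicts collapse_num_dict and cluster_dict have unique keys (a Python dict cannot carry duplicate keys), and
-- every utg in utgs_list absent from utg_group_dict must be a key of collapse_num_dict (otherwise
-- collapse_num_dict[utg] raises KeyError in A).
def Pre_correct_collapse_num (utgs_list : List String) (collapse_num_dict : List (String × Int)) (cluster_dict : List (String × List String)) (utg_group_dict : List (String × String)) : Prop :=
  (collapse_num_dict.map Prod.fst).Nodup ∧ (cluster_dict.map Prod.fst).Nodup ∧
  ∀ u ∈ utgs_list, (PySem.Dict.mk utg_group_dict).contains u = true ∨ (PySem.Dict.mk collapse_num_dict).contains u = true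
instance (utgs_list : List String) (collapse_num_dict : List (String × Int)) (cluster_dict : List (String × List String)) (utg_group_dict : List (String × String)) : Decidable (Pre_correct_collapse_num utgs_list collapse_num_dict cluster_dict utg_group_dict) := by unfold Pre_correct_collapse_num; infer_instance

def pvWitness_correct_collapse_num : List String × (List (String × Int)) × (List (String × List String)) × (List (String × String)) :=
  (["u1", "u3"], [("u1", 1), ("u2", 2), ("u3", 1)], [("g1", ["u2", "u3", "u9"]), ("g2", ["u2"])], [("u1", "g1")])

def Spec_correct_collapse_num (utgs_list : List String) (collapse_num_dict : List (String × Int)) (cluster_dict : List (String × List String)) (utg_group_dict : List (String × String)) (out : List (String × Int)) : Prop := out = correct_collapse_num_alt utgs_list collapse_num_dict cluster_dict utg_group_dict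
instance (utgs_list : List String) (collapse_num_dict : List (String × Int)) (cluster_dict : List (String × List String)) (utg_group_dict : List (String × String)) (out : List (String × Int)) : Decidable (Spec_correct_collapse_num utgs_list collapse_num_dict cluster_dict utg_group_dict out) := by unfold Spec_correct_collapse_num; infer_instance

-- ===== CLAIM (what is proved, stated in full; the proofs are below) =====
def Claim_equal_correct_collapse_num : Prop := ∀ (utgs_list : List String) (collapse_num_dict : List (String × Int)) (cluster_dict : List (String × List String)) (utg_group_dict : List (String × String)), Dom_correct_collapse_num utgs_list collapse_num_dict cluster_dict utg_group_dict → Pre_correct_collapse_num utgs_list collapse_num_dict cluster_dict utg_group_dict → Spec_correct_collapse_num utgs_list collapse_num_dict cluster_dict utg_group_dict (correct_collapse_num utgs_list collapse_num_dict cluster_dict utg_group_dict)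

-- ===== LEMMAS AND PROOFS =====

-- a key whose getD-with-default-0 value is 1 is present
lemma contains_of_getD_one (d : PySem.Dict String Int) (k : String) (h : d.getD k 0 = 1) :
    d.contains k = true := by
  rw [PySem.Dict.contains_eq_isSome_get?]
  cases hg : d.get? k with
  | none => simp [PySem.Dict.getD, hg] at h
  | some v => simp

-- first loop (set forced keys to -1) preserves the key list
lemma loop1_keys (cnd : PySem.Dict String Int) (ugd : PySem.Dict String String) :
    ∀ (us : List String) (d : PySem.Dict String Int), d.keys = cnd.keys →
      (us.foldl (fun d utg => if ugd.contains utg = false ∧ cnd.getD utg 0 = 1 then d.insert utg (-1) else d) d).keys = cnd.keys := by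
  intro us
  induction us with
  | nil => intro d h; simpa using h
  | cons u us ih =>
    intro d h
    simp only [List.foldl_cons]
    by_cases hC : ugd.contains u = false ∧ cnd.getD u 0 = 1
    · have hdc : d.contains u = true := by
        rw [PySem.Dict.contains_eq_decide_mem_keys, h, ← PySem.Dict.contains_eq_decide_mem_keys]
        exact contains_of_getD_one cnd u hC.2
      rw [if_pos hC]
      refine ih _ ?_
      rw [PySem.Dict.keys_insert_of_contains d (-1) hdc]
      exact h
    · rw [if_neg hC]; exact ih _ h

-- value of the first loop at any key
lemma loop1_getD (cnd : PySem.Dict String Int) (ugd : PySem.Dict String String) :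
    ∀ (us : List String) (d : PySem.Dict String Int) (k : String),
      (us.foldl (fun d utg => if ugd.contains utg = false ∧ cnd.getD utg 0 = 1 then d.insert utg (-1) else d) d).getD k 0
        = if k ∈ us ∧ ugd.contains k = false ∧ cnd.getD k 0 = 1 then -1 else d.getD k 0 := by
  intro us
  induction us with
  | nil => intro d k; simp
  | cons u us ih =>
    intro d k
    simp only [List.foldl_cons]
    rw [ih]
    by_cases hk : k = u
    · subst hk
      by_cases hC : ugd.contains k = false ∧ cnd.getD k 0 = 1
      · simp [hC, PySem.Dict.getD_insert_self]
      · simp [hC]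
    · have hin : (if ugd.contains u = false ∧ cnd.getD u 0 = 1 then d.insert u (-1) else d).getD k 0 = d.getD k 0 := by
        split_ifs with h
        · exact PySem.Dict.getD_insert_of_ne d (-1) 0 hk
        · rfl
      rw [hin]
      simp [List.mem_cons, hk]

-- the decrement loop over one member list preserves the key list
lemma loop2_keys :
    ∀ (L : List String) (d : PySem.Dict String Int),
      (L.foldl (fun d ctg => if d.contains ctg = true then d.modify ctg 0 (fun x => x - 1) else d) d).keys = d.keys := by
  intro L
  induction L with
  | nil => intro d; rfl
  | cons c L ih =>
    intro d
    simp only [List.foldl_cons]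
    rw [ih]
    by_cases hc : d.contains c = true
    · rw [if_pos hc, PySem.Dict.keys_modify, PySem.Dict.keys_insert_of_contains d _ hc]
    · rw [if_neg hc]

-- value of the decrement loop over one member list
lemma loop2_getD :
    ∀ (L : List String) (d : PySem.Dict String Int) (k : String),
      (L.foldl (fun d ctg => if d.contains ctg = true then d.modify ctg 0 (fun x => x - 1) else d) d).getD k 0
        = d.getD k 0 - (if d.contains k = true then (L.count k : Int) else 0) := by
  intro L
  induction L with
  | nil => intro d k; simp
  | cons c L ih =>
    intro d k
    simp only [List.foldl_cons]
    rw [ih]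
    by_cases hc : d.contains c = true
    · rw [if_pos hc]
      have hkeys : (d.modify c 0 (fun x => x - 1)).contains k = d.contains k := by
        rw [PySem.Dict.contains_eq_decide_mem_keys, PySem.Dict.contains_eq_decide_mem_keys d,
            PySem.Dict.keys_modify, PySem.Dict.keys_insert_of_contains d _ hc]
      rw [hkeys]
      by_cases hk : k = c
      · subst hk
        simp only [PySem.Dict.getD_modify_self, if_pos hc, List.count_cons_self]
        push_cast
        ring
      · rw [PySem.Dict.getD_modify_of_ne d 0 _ hk]
        simp [Ne.symm hk]
    · rw [if_neg hc]
      by_cases hk : k = c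
      · subst hk
        simp only [if_neg hc]
      · simp [Ne.symm hk]

-- A's nested group loop preserves the key list
lemma loop2n_keys (cld : PySem.Dict String (List String)) :
    ∀ (gs : List String) (d : PySem.Dict String Int),
      (gs.foldl (fun d group => (cld.getD group []).foldl (fun d ctg => if d.contains ctg = true then d.modify ctg 0 (fun x => x - 1) else d) d) d).keys = d.keys := by
  intro gs
  induction gs with
  | nil => intro d; rfl
  | cons g gs ih =>
    intro d
    simp only [List.foldl_cons]
    rw [ih, loop2_keys]

-- value of A's nested group loop at any key
lemma loop2n_getD (cld : PySem.Dict String (List String)) :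
    ∀ (gs : List String) (d : PySem.Dict String Int) (k : String),
      (gs.foldl (fun d group => (cld.getD group []).foldl (fun d ctg => if d.contains ctg = true then d.modify ctg 0 (fun x => x - 1) else d) d) d).getD k 0
        = d.getD k 0 - (if d.contains k = true then ((gs.map (fun g => cld.getD g [])).flatten.count k : Int) else 0) := by
  intro gs
  induction gs with
  | nil => intro d k; simp
  | cons g gs ih =>
    intro d k
    simp only [List.foldl_cons]
    rw [ih, loop2_getD]
    have hcont : ((cld.getD g []).foldl (fun d ctg => if d.contains ctg = true then d.modify ctg 0 (fun x => x - 1) else d) d).contains k = d.contains k := by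
      rw [PySem.Dict.contains_eq_decide_mem_keys, PySem.Dict.contains_eq_decide_mem_keys d, loop2_keys]
    rw [hcont]
    by_cases hk : d.contains k = true
    · simp only [if_pos hk, List.map_cons, List.flatten_cons, List.count_append]
      push_cast
      ring
    · simp only [if_neg hk, sub_zero]

-- B's per-key occurrence sum equals the count in the flattened member lists
lemma occ_sum_eq_flatten_count :
    ∀ (Ls : List (List String)) (k : String),
      ((Ls.map (fun l => (PySem.List.count l k : Int))).sum : Int) = (Ls.flatten.count k : Int) := by
  intro Ls k
  induction Ls with
  | nil => simp
  | cons L Ls ih =>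
    simp only [List.map_cons, List.sum_cons, List.flatten_cons, List.count_append,
      PySem.List.count_eq] at ih ⊢
    rw [ih]
    push_cast
    ring

-- the heart of the equivalence, stated over the wrapped dicts
lemma correct_collapse_num_main (us : List String) (cnd : PySem.Dict String Int)
    (cld : PySem.Dict String (List String)) (ugd : PySem.Dict String String)
    (h1 : cnd.keys.Nodup) (h2 : cld.keys.Nodup) :
    (cld.keys.foldl (fun d group => (cld.getD group []).foldl (fun d ctg => if d.contains ctg = true then d.modify ctg 0 (fun x => x - 1) else d) d)
        (us.foldl (fun d utg => if ugd.contains utg = false ∧ cnd.getD utg 0 = 1 then d.insert utg (-1) else d) cnd)).items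
    = ((cnd.items).foldl (fun r kv => r.insert kv.1
          ((if kv.2 = 1 ∧ kv.1 ∈ us ∧ ugd.contains kv.1 = false then -1 else kv.2)
            - ((cld.values.map (fun l => (PySem.List.count l kv.1 : Int))).sum))) PySem.Dict.empty).items := by
  set d1 := us.foldl (fun d utg => if ugd.contains utg = false ∧ cnd.getD utg 0 = 1 then d.insert utg (-1) else d) cnd with hd1
  set d2 := cld.keys.foldl (fun d group => (cld.getD group []).foldl (fun d ctg => if d.contains ctg = true then d.modify ctg 0 (fun x => x - 1) else d) d) d1 with hd2
  have hk1 : d1.keys = cnd.keys := by rw [hd1]; exact loop1_keys cnd ugd us cnd rfl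
  have hk2 : d2.keys = cnd.keys := by rw [hd2, loop2n_keys]; exact hk1
  have hnd2 : d2.keys.Nodup := by rw [hk2]; exact h1
  have hRHS : (cnd.items.foldl (fun r kv => r.insert kv.1 ((if kv.2 = 1 ∧ kv.1 ∈ us ∧ ugd.contains kv.1 = false then -1 else kv.2) - ((cld.values.map (fun l => (PySem.List.count l kv.1 : Int))).sum))) PySem.Dict.empty).items
      = (PySem.Dict.empty : PySem.Dict String Int).items
        ++ cnd.items.map (fun kv => (kv.1, (if kv.2 = 1 ∧ kv.1 ∈ us ∧ ugd.contains kv.1 = false then -1 else kv.2) - ((cld.values.map (fun l => (PySem.List.count l kv.1 : Int))).sum))) :=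
    PySem.Dict.items_foldl_insert_fresh cnd.items (fun kv => kv.1)
      (fun kv => (if kv.2 = 1 ∧ kv.1 ∈ us ∧ ugd.contains kv.1 = false then -1 else kv.2) - ((cld.values.map (fun l => (PySem.List.count l kv.1 : Int))).sum))
      PySem.Dict.empty (fun a _ => PySem.Dict.contains_empty a.1) h1
  have hemp : (PySem.Dict.empty : PySem.Dict String Int).items = ([] : List (String × Int)) := rfl
  rw [PySem.Dict.items_eq_map_keys d2 hnd2 0, hk2, hRHS, hemp, List.nil_append,
      PySem.Dict.items_eq_map_keys cnd h1 0, List.map_map]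
  refine List.map_congr_left ?_
  intro k hkmem
  show (k, d2.getD k 0) = (k, (if cnd.getD k 0 = 1 ∧ k ∈ us ∧ ugd.contains k = false then -1 else cnd.getD k 0) - ((cld.values.map (fun l => (PySem.List.count l k : Int))).sum))
  refine congrArg (Prod.mk k) ?_
  have hcont1 : d1.contains k = true := by
    rw [PySem.Dict.contains_eq_decide_mem_keys, hk1]
    simpa using hkmem
  have hd2v : d2.getD k 0 = d1.getD k 0 - ((cld.keys.map (fun g => cld.getD g [])).flatten.count k : Int) := by
    rw [hd2, loop2n_getD, if_pos hcont1]
  have hd1v : d1.getD k 0 = if k ∈ us ∧ ugd.contains k = false ∧ cnd.getD k 0 = 1 then -1 else cnd.getD k 0 := by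
    rw [hd1]
    exact loop1_getD cnd ugd us cnd k
  have hoccv : ((cld.values.map (fun l => (PySem.List.count l k : Int))).sum : Int)
      = ((cld.keys.map (fun g => cld.getD g [])).flatten.count k : Int) := by
    rw [occ_sum_eq_flatten_count, PySem.Dict.values_eq_map_keys cld h2 []]
  rw [hd2v, hd1v, hoccv]
  by_cases hP : k ∈ us ∧ ugd.contains k = false ∧ cnd.getD k 0 = 1
  · rw [if_pos hP, if_pos ⟨hP.2.2, hP.1, hP.2.1⟩]
  · rw [if_neg hP, if_neg (fun h => hP ⟨h.2.1, h.2.2, h.1⟩)]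

-- ===== VERDICT (by name: the statement is the Claim_ definition above) =====
theorem correct_collapse_num_spec : Claim_equal_correct_collapse_num := by
  intro utgs_list collapse_num_dict cluster_dict utg_group_dict _hDom hPre
  obtain ⟨h1, h2, _⟩ := hPre
  unfold Spec_correct_collapse_num correct_collapse_num correct_collapse_num_alt
  exact correct_collapse_num_main utgs_list (PySem.Dict.mk collapse_num_dict)
    (PySem.Dict.mk cluster_dict) (PySem.Dict.mk utg_group_dict)
    (by rw [PySem.Dict.keys_mk]; exact h1) (by rw [PySem.Dict.keys_mk]; exact h2)
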